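-- pv_equiv track=rewrite | github.com/jabalpureishan/CodeForces | C_Find_and_Replace.py | solve
-- ===== SOURCE A (Python) =====
-- def solve(n,s):
--     d = {}
--     for i in range(n):
--         if s[i] not in d:
--             d[s[i]] = i%2==0
--         elif (i%2==0)!=d[s[i]]:
--             return "NO"
--     return "YES"
-- ===== SOURCE B (Python) =====
-- def solve(n, s):
--     even = {s[i] for i in range(0, n, 2)}
--     odd = {s[i] for i in range(1, n, 2)}
--     return "NO" if even & odd else "YES"
-- ===== Notes on version B (the rewrite author's own statement) =====
-- stated objective: idiomatic
-- what changed: A's single pass maintaining a char->parity dict with early return is replaced by two index-parity set comprehensions over range(0,n,2) and range(1,n,2) followed by a set intersection test.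
-- outside the precondition, e.g. on solve(5, 'aab'): A returns 'NO', B raises IndexError
import Mathlib
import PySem

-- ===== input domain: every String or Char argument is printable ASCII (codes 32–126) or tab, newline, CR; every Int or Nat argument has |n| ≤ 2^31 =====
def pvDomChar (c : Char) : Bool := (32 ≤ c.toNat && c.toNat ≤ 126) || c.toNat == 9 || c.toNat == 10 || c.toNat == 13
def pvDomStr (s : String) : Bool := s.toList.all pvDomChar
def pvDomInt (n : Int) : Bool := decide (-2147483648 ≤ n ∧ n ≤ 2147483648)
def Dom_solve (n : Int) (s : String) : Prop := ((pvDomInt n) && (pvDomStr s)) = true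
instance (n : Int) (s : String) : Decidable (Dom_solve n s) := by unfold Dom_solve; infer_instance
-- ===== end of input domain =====

-- B replaces A's single-pass char->parity dict with two index-parity sets and an intersection test (idiomatic, same cost).


-- ===== PORT A =====
-- the loop 'for i in range(n)' with dict d and early return "NO"
def solveGo (t : List Char) (idxs : List Int) (d : PySem.Dict Char Bool) : String :=
  match idxs with
  | [] => "YES"
  | i :: rest =>
    match PySem.List.pyGet? t i with
    | none => "IndexError"   -- Python raises IndexError here; Pre_solve excludes these inputs
    | some c =>
      match PySem.Dict.get? d c with
      | none => solveGo t rest (PySem.Dict.insert d c (PySem.Int.mod i 2 == 0))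
      | some b => if (PySem.Int.mod i 2 == 0) != b then "NO" else solveGo t rest d

def solve (n : Int) (s : String) : String :=
  solveGo s.toList (PySem.List.pyRange 0 n 1) PySem.Dict.empty

-- ===== PORT B =====
-- even = {s[i] for i in range(0,n,2)}, odd = {s[i] for i in range(1,n,2)}; "NO" iff even & odd.
-- (the comprehension is ported with filterMap pyGet?: under Pre_solve every index is in range, so nothing is dropped)
def solve_alt (n : Int) (s : String) : String :=
  let t := s.toList
  let evens : PySem.Set Char := PySem.Set.ofList ((PySem.List.pyRange 0 n 2).filterMap (PySem.List.pyGet? t))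
  let odds : PySem.Set Char := PySem.Set.ofList ((PySem.List.pyRange 1 n 2).filterMap (PySem.List.pyGet? t))
  if PySem.Set.inter evens odds ≠ [] then "NO" else "YES"

-- ===== PRECONDITION & SPEC =====
-- Pre_ excludes n > len(s): there Python A raises IndexError at s[len(s)] (except when a parity
-- conflict inside the existing prefix lets it return "NO" first), and Python B uniformly raises IndexError.
def Pre_solve (n : Int) (s : String) : Prop := n ≤ (s.toList.length : Int)
instance (n : Int) (s : String) : Decidable (Pre_solve n s) := by unfold Pre_solve; infer_instance
def pvWitness_solve : Int × String := (4, "abab")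

def Spec_solve (n : Int) (s : String) (out : String) : Prop := out = solve_alt n s
instance (n : Int) (s : String) (out : String) : Decidable (Spec_solve n s out) := by unfold Spec_solve; infer_instance

-- ===== CLAIM (what is proved, stated in full; the proofs are below) =====
def Claim_equal_solve : Prop := ∀ (n : Int) (s : String), Dom_solve n s → Pre_solve n s → Spec_solve n s (solve n s)

-- ===== LEMMAS AND PROOFS =====

lemma pyGet?_isSome_of_lt (t : List Char) (i : Int) (h0 : 0 ≤ i) (h1 : i < (t.length : Int)) :
    ∃ c, PySem.List.pyGet? t i = some c := by
  simp only [PySem.List.pyGet?, PySem.List.pyIdx?, if_pos h0, if_pos h1, Option.bind_some]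
  exact ⟨t[i.toNat]'(by omega), List.getElem?_eq_getElem (by omega)⟩

-- invariant (1): every remaining index respects the parities already recorded in d
def Keeps (t : List Char) (d : PySem.Dict Char Bool) (l : List Int) : Prop :=
  ∀ i ∈ l, ∀ c, PySem.List.pyGet? t i = some c →
    ∀ b, PySem.Dict.get? d c = some b → (PySem.Int.mod i 2 == 0) = b

-- invariant (2): equal characters among the remaining indices occur at equal index parities
def Consist (t : List Char) (l : List Int) : Prop :=
  ∀ i ∈ l, ∀ j ∈ l, PySem.List.pyGet? t i = PySem.List.pyGet? t j →
    (PySem.Int.mod i 2 == 0) = (PySem.Int.mod j 2 == 0)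

lemma solveGo_yes_iff (t : List Char) (idxs : List Int) :
    ∀ d : PySem.Dict Char Bool,
    (∀ i ∈ idxs, ∃ c, PySem.List.pyGet? t i = some c) →
    (solveGo t idxs d = "YES" ↔ (Keeps t d idxs ∧ Consist t idxs)) := by
  induction idxs with
  | nil =>
    intro d _
    constructor
    · intro _; exact ⟨by intro i hi; simp at hi, by intro i hi; simp at hi⟩
    · intro _; rfl
  | cons i rest ih =>
    intro d hin
    obtain ⟨c, hc⟩ := hin i List.mem_cons_self
    have hin' : ∀ j ∈ rest, ∃ c, PySem.List.pyGet? t j = some c :=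
      fun j hj => hin j (List.mem_cons_of_mem _ hj)
    have hm : PySem.Int.mod i 2 = i % 2 := PySem.Int.mod_eq_emod_of_pos (by norm_num)
    simp only [solveGo, hc]
    cases hd : PySem.Dict.get? d c with
    | none =>
      rw [ih _ hin']
      constructor
      · rintro ⟨K', S'⟩
        constructor
        · intro j hj c' hc' b hb'
          rcases List.mem_cons.mp hj with rfl | hj
          · rw [hc] at hc'; obtain rfl : c' = c := by injection hc'.symm
            rw [hd] at hb'; exact absurd hb' (by simp)
          · by_cases hcc : c' = c
            · subst hcc; rw [hd] at hb'; exact absurd hb' (by simp)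
            · exact K' j hj c' hc' b (by
                rw [PySem.Dict.get?_insert_of_ne d _ hcc]; exact hb')
        · intro j hj k hk heq
          rcases List.mem_cons.mp hj with rfl | hj1 <;> rcases List.mem_cons.mp hk with rfl | hk1
          · rfl
          · rw [hc] at heq
            have := K' k hk1 c heq.symm (PySem.Int.mod j 2 == 0)
              (PySem.Dict.get?_insert_self d c _)
            exact this.symm
          · rw [hc] at heq
            exact K' j hj1 c heq (PySem.Int.mod k 2 == 0) (PySem.Dict.get?_insert_self d c _)
          · exact S' j hj1 k hk1 heq
      · rintro ⟨K, S⟩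
        constructor
        · intro j hj c' hc' b hb'
          by_cases hcc : c' = c
          · subst hcc
            rw [PySem.Dict.get?_insert_self] at hb'
            obtain rfl : b = (PySem.Int.mod i 2 == 0) := by injection hb'.symm
            have heq : PySem.List.pyGet? t j = PySem.List.pyGet? t i := by rw [hc, hc']
            exact S j (List.mem_cons_of_mem _ hj) i List.mem_cons_self heq
          · rw [PySem.Dict.get?_insert_of_ne d _ hcc] at hb'
            exact K j (List.mem_cons_of_mem _ hj) c' hc' b hb'
        · intro j hj k hk heq
          exact S j (List.mem_cons_of_mem _ hj) k (List.mem_cons_of_mem _ hk) heq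
    | some b =>
      dsimp only
      by_cases hb : (PySem.Int.mod i 2 == 0) = b
      · rw [hm] at hb
        rw [hm, if_neg (by simp [hb]), ih _ hin']
        rw [← hm] at hb
        constructor
        · rintro ⟨K, S⟩
          constructor
          · intro j hj c' hc' b' hb'
            rcases List.mem_cons.mp hj with rfl | hj
            · rw [hc] at hc'; obtain rfl : c' = c := by injection hc'.symm
              rw [hd] at hb'; obtain rfl : b' = b := by injection hb'.symm
              exact hb
            · exact K j hj c' hc' b' hb'
          · intro j hj k hk heq
            rcases List.mem_cons.mp hj with rfl | hj1 <;> rcases List.mem_cons.mp hk with rfl | hk1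
            · rfl
            · rw [hc] at heq
              have := K k hk1 c heq.symm b hd
              rw [hb]; exact this.symm
            · rw [hc] at heq
              have := K j hj1 c heq b hd
              rw [this, hb]
            · exact S j hj1 k hk1 heq
        · rintro ⟨K, S⟩
          exact ⟨fun j hj => K j (List.mem_cons_of_mem _ hj),
                 fun j hj k hk => S j (List.mem_cons_of_mem _ hj) k (List.mem_cons_of_mem _ hk)⟩
      · rw [hm] at hb
        rw [hm, if_pos (by simp [bne_iff_ne]; exact hb)]
        rw [← hm] at hb
        constructor
        · intro h; exact absurd h (by decide)
        · rintro ⟨K, S⟩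
          exact absurd (K i List.mem_cons_self c hc b hd) hb

lemma solveGo_cases (t : List Char) (idxs : List Int) :
    ∀ d, (∀ i ∈ idxs, ∃ c, PySem.List.pyGet? t i = some c) →
      solveGo t idxs d = "YES" ∨ solveGo t idxs d = "NO" := by
  induction idxs with
  | nil => intro d _; left; rfl
  | cons i rest ih =>
    intro d hin
    obtain ⟨c, hc⟩ := hin i List.mem_cons_self
    have hin' : ∀ j ∈ rest, ∃ c, PySem.List.pyGet? t j = some c :=
      fun j hj => hin j (List.mem_cons_of_mem _ hj)
    simp only [solveGo, hc]
    cases hd : PySem.Dict.get? d c with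
    | none => exact ih _ hin'
    | some b =>
      dsimp only
      have hm : PySem.Int.mod i 2 = i % 2 := PySem.Int.mod_eq_emod_of_pos (by norm_num)
      rw [hm]
      by_cases hb : ((i % 2 : Int) == 0) = b
      · rw [if_neg (by simp [hb])]; exact ih _ hin'
      · rw [if_pos (by simp [bne_iff_ne]; exact hb)]; right; rfl

lemma inRange_all (n : Int) (s : String) (hpre : Pre_solve n s) :
    ∀ i ∈ PySem.List.pyRange 0 n 1, ∃ c, PySem.List.pyGet? s.toList i = some c := by
  intro i hi
  rw [PySem.List.mem_pyRange_one] at hi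
  exact pyGet?_isSome_of_lt _ _ hi.1 (lt_of_lt_of_le hi.2 hpre)

lemma solve_yes_iff (n : Int) (s : String) (hpre : Pre_solve n s) :
    solve n s = "YES" ↔ Consist s.toList (PySem.List.pyRange 0 n 1) := by
  unfold solve
  rw [solveGo_yes_iff _ _ _ (inRange_all n s hpre)]
  constructor
  · exact fun h => h.2
  · intro h
    refine ⟨?_, h⟩
    intro i _ c _ b hb
    rw [PySem.Dict.get?_empty] at hb
    exact absurd hb (by simp)

lemma solve_alt_no_iff (n : Int) (s : String) :
    solve_alt n s = "NO" ↔ ∃ c,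
      (∃ i ∈ PySem.List.pyRange 0 n 2, PySem.List.pyGet? s.toList i = some c) ∧
      (∃ j ∈ PySem.List.pyRange 1 n 2, PySem.List.pyGet? s.toList j = some c) := by
  have hmem : ∀ c : Char,
      (c ∈ PySem.Set.inter
        (PySem.Set.ofList ((PySem.List.pyRange 0 n 2).filterMap (PySem.List.pyGet? s.toList)))
        (PySem.Set.ofList ((PySem.List.pyRange 1 n 2).filterMap (PySem.List.pyGet? s.toList)))) ↔
      ((∃ i ∈ PySem.List.pyRange 0 n 2, PySem.List.pyGet? s.toList i = some c) ∧
       (∃ j ∈ PySem.List.pyRange 1 n 2, PySem.List.pyGet? s.toList j = some c)) := by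
    intro c
    rw [PySem.Set.mem_inter, PySem.Set.mem_ofList, PySem.Set.mem_ofList,
        List.mem_filterMap, List.mem_filterMap]
  unfold solve_alt
  dsimp only
  split_ifs with h
  · simp only [ne_eq] at h
    constructor
    · intro _
      obtain ⟨c, hc⟩ := List.exists_mem_of_ne_nil _ h
      exact ⟨c, (hmem c).mp hc⟩
    · intro _; rfl
  · simp only [ne_eq, not_not] at h
    constructor
    · intro hy; exact absurd hy (by decide)
    · rintro ⟨c, hc⟩
      have : c ∈ ([] : List Char) := h ▸ (hmem c).mpr hc
      simp at this

lemma solve_alt_cases (n : Int) (s : String) : solve_alt n s = "YES" ∨ solve_alt n s = "NO" := by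
  unfold solve_alt; dsimp only; split_ifs <;> simp

-- parity-pair consistency over range(n) is exactly emptiness of even∩odd over the stepped ranges
lemma bridge (n : Int) (s : String) (hpre : Pre_solve n s) :
    Consist s.toList (PySem.List.pyRange 0 n 1) ↔
      ¬ ∃ c, (∃ i ∈ PySem.List.pyRange 0 n 2, PySem.List.pyGet? s.toList i = some c) ∧
             (∃ j ∈ PySem.List.pyRange 1 n 2, PySem.List.pyGet? s.toList j = some c) := by
  have hsome : ∀ i : Int, 0 ≤ i → i < n → ∃ c, PySem.List.pyGet? s.toList i = some c :=
    fun i h0 h1 => pyGet?_isSome_of_lt _ _ h0 (lt_of_lt_of_le h1 hpre)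
  constructor
  · rintro hC ⟨c, ⟨i, hi, hci⟩, ⟨j, hj, hcj⟩⟩
    rw [PySem.List.mem_pyRange_iff_of_pos (by norm_num : (0:Int) < 2) i] at hi
    rw [PySem.List.mem_pyRange_iff_of_pos (by norm_num : (0:Int) < 2) j] at hj
    have h := hC i (PySem.List.mem_pyRange_one.mpr ⟨hi.1, hi.2.1⟩)
                j (PySem.List.mem_pyRange_one.mpr ⟨by omega, hj.2.1⟩)
                (by rw [hci, hcj])
    rw [PySem.Int.mod_eq_emod_of_pos (by norm_num : (0:Int) < 2),
        PySem.Int.mod_eq_emod_of_pos (by norm_num : (0:Int) < 2)] at h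
    have hie : i % 2 = 0 := by omega
    have hjo : j % 2 = 1 := by omega
    rw [hie, hjo] at h
    simp at h
  · intro hNE i hi j hj heq
    rw [PySem.List.mem_pyRange_one] at hi hj
    obtain ⟨c, hci⟩ := hsome i hi.1 hi.2
    have hcj : PySem.List.pyGet? s.toList j = some c := heq ▸ hci
    rw [PySem.Int.mod_eq_emod_of_pos (by norm_num : (0:Int) < 2),
        PySem.Int.mod_eq_emod_of_pos (by norm_num : (0:Int) < 2)]
    rcases Int.emod_two_eq_zero_or_one i with h2i | h2i <;>
      rcases Int.emod_two_eq_zero_or_one j with h2j | h2j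
    · rw [h2i, h2j]
    · exfalso
      exact hNE ⟨c,
        ⟨i, (PySem.List.mem_pyRange_iff_of_pos (by norm_num) i).mpr ⟨hi.1, hi.2, by omega⟩, hci⟩,
        ⟨j, (PySem.List.mem_pyRange_iff_of_pos (by norm_num) j).mpr ⟨by omega, hj.2, by omega⟩, hcj⟩⟩
    · exfalso
      exact hNE ⟨c,
        ⟨j, (PySem.List.mem_pyRange_iff_of_pos (by norm_num) j).mpr ⟨hj.1, hj.2, by omega⟩, hcj⟩,
        ⟨i, (PySem.List.mem_pyRange_iff_of_pos (by norm_num) i).mpr ⟨by omega, hi.2, by omega⟩, hci⟩⟩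
    · rw [h2i, h2j]

-- ===== VERDICT (by name: the statement is the Claim_ definition above) =====
theorem solve_spec : Claim_equal_solve := by
  unfold Claim_equal_solve
  intro n s _ hpre
  show solve n s = solve_alt n s
  by_cases hC : Consist s.toList (PySem.List.pyRange 0 n 1)
  · rw [(solve_yes_iff n s hpre).mpr hC]
    rcases solve_alt_cases n s with hB | hB
    · exact hB.symm
    · exact absurd ((solve_alt_no_iff n s).mp hB) ((bridge n s hpre).mp hC)
  · have hA : solve n s = "NO" := by
      rcases solveGo_cases s.toList (PySem.List.pyRange 0 n 1) PySem.Dict.empty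
        (inRange_all n s hpre) with hA | hA
      · exact absurd ((solve_yes_iff n s hpre).mp hA) hC
      · exact hA
    have hB : solve_alt n s = "NO" := by
      rw [solve_alt_no_iff]
      by_contra hE
      exact hC ((bridge n s hpre).mpr hE)
    rw [hA, hB]
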